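-- pv_equiv track=rewrite | github.com/HumanFirstAi/roadmap-synth | app.py | extract_modifiers
-- ===== SOURCE A (Python) =====
-- from typing import Optional, List, Dict
--
-- def extract_modifiers(query: str) -> Dict[str, any]:
--     """Extract query modifiers (priority, recency, etc.)."""
--     modifiers = {}
--
--     query_lower = query.lower()
--
--     # Priority
--     if any(w in query_lower for w in ["critical", "urgent", "important", "priority"]):
--         modifiers["priority"] = "high"
--
--     # Recency
--     if any(w in query_lower for w in ["recent", "latest", "new", "current"]):
--         modifiers["recency"] = "recent"
--
--     # Severity
--     if any(w in query_lower for w in ["blocker", "blocking", "severe", "major"]):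
--         modifiers["severity"] = "high"
--
--     # Scope
--     if any(w in query_lower for w in ["all", "everything", "comprehensive", "complete"]):
--         modifiers["scope"] = "broad"
--     elif any(w in query_lower for w in ["specific", "particular", "just", "only"]):
--         modifiers["scope"] = "narrow"
--
--     return modifiers
-- ===== SOURCE B (Python) =====
-- # Multi-pattern scan: walk the query once, matching every keyword at each position,
-- # collecting found flags in a set; then assemble the modifiers dict from the flags.
-- _KEYWORD_FLAGS = [
--     ("critical", "priority"), ("urgent", "priority"), ("important", "priority"), ("priority", "priority"),
--     ("recent", "recency"), ("latest", "recency"), ("new", "recency"), ("current", "recency"),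
--     ("blocker", "severity"), ("blocking", "severity"), ("severe", "severity"), ("major", "severity"),
--     ("all", "broad"), ("everything", "broad"), ("comprehensive", "broad"), ("complete", "broad"),
--     ("specific", "narrow"), ("particular", "narrow"), ("just", "narrow"), ("only", "narrow"),
-- ]
--
-- def extract_modifiers(query: str):
--     """Extract query modifiers (priority, recency, etc.)."""
--     q = query.lower()
--     found = set()
--     for i in range(len(q)):
--         for w, flag in _KEYWORD_FLAGS:
--             if flag not in found and q.startswith(w, i):
--                 found.add(flag)
--     modifiers = {}
--     if "priority" in found:
--         modifiers["priority"] = "high"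
--     if "recency" in found:
--         modifiers["recency"] = "recent"
--     if "severity" in found:
--         modifiers["severity"] = "high"
--     if "broad" in found:
--         modifiers["scope"] = "broad"
--     elif "narrow" in found:
--         modifiers["scope"] = "narrow"
--     return modifiers
-- ===== Notes on version B (the rewrite author's own statement) =====
-- stated objective: alternative
-- what changed: Instead of running a separate substring search over the query for each keyword group, B scans the query text once position by position, matching all twenty keywords at each position into a set of found flags, and then assembles the modifiers dict from that flag set.
import Mathlib
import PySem

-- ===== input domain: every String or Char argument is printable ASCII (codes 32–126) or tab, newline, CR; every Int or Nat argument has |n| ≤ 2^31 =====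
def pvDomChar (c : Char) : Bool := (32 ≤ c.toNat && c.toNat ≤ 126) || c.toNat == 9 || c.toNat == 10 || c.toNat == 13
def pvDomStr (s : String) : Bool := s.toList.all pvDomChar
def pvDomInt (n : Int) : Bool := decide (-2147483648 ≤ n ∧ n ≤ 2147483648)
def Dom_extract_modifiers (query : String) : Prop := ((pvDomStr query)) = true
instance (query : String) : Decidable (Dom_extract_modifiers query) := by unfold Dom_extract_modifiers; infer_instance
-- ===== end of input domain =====

-- B replaces A's per-keyword substring searches by a single position-by-position scan of the
-- query that matches all keywords at each position into a set of flags (objective: alternative).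


-- ===== PORT A =====
def extract_modifiers (query : String) : List (String × String) :=
  let modifiers : PySem.Dict String String := PySem.Dict.empty
  let query_lower := PySem.Str.lower query
  let modifiers := if ["critical", "urgent", "important", "priority"].any (fun w => PySem.Str.isIn w query_lower)
    then PySem.Dict.insert modifiers "priority" "high" else modifiers
  let modifiers := if ["recent", "latest", "new", "current"].any (fun w => PySem.Str.isIn w query_lower)
    then PySem.Dict.insert modifiers "recency" "recent" else modifiers
  let modifiers := if ["blocker", "blocking", "severe", "major"].any (fun w => PySem.Str.isIn w query_lower)
    then PySem.Dict.insert modifiers "severity" "high" else modifiers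
  let modifiers := if ["all", "everything", "comprehensive", "complete"].any (fun w => PySem.Str.isIn w query_lower)
    then PySem.Dict.insert modifiers "scope" "broad"
    else if ["specific", "particular", "just", "only"].any (fun w => PySem.Str.isIn w query_lower)
    then PySem.Dict.insert modifiers "scope" "narrow" else modifiers
  modifiers.items

-- ===== PORT B =====
def pvKeywordFlags : List (String × String) :=
  [("critical", "priority"), ("urgent", "priority"), ("important", "priority"), ("priority", "priority"),
   ("recent", "recency"), ("latest", "recency"), ("new", "recency"), ("current", "recency"),
   ("blocker", "severity"), ("blocking", "severity"), ("severe", "severity"), ("major", "severity"),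
   ("all", "broad"), ("everything", "broad"), ("comprehensive", "broad"), ("complete", "broad"),
   ("specific", "narrow"), ("particular", "narrow"), ("just", "narrow"), ("only", "narrow")]

-- the inner keyword loop at one position (q.startswith(w, i) = w is a prefix of the suffix)
def pvMatchAt (suffix : List Char) (found : PySem.Set String) : PySem.Set String :=
  pvKeywordFlags.foldl (fun f p =>
    if !PySem.Set.contains f p.2 && PySem.Chars.startswith suffix p.1.toList
    then PySem.Set.add f p.2 else f) found

-- the 'for i in range(len(q))' loop, walking the positions as successive suffixes
def pvScan : List Char → PySem.Set String → PySem.Set String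
  | [], found => found
  | c :: rest, found => pvScan rest (pvMatchAt (c :: rest) found)

def extract_modifiers_alt (query : String) : List (String × String) :=
  let q := PySem.Str.lower query
  let found := pvScan q.toList PySem.Set.empty
  let m : PySem.Dict String String := PySem.Dict.empty
  let m := if PySem.Set.contains found "priority" then m.insert "priority" "high" else m
  let m := if PySem.Set.contains found "recency" then m.insert "recency" "recent" else m
  let m := if PySem.Set.contains found "severity" then m.insert "severity" "high" else m
  let m := if PySem.Set.contains found "broad" then m.insert "scope" "broad"
           else if PySem.Set.contains found "narrow" then m.insert "scope" "narrow" else m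
  m.items

-- ===== PRECONDITION & SPEC =====
def Spec_extract_modifiers (query : String) (out : List (String × String)) : Prop := out = extract_modifiers_alt query
instance (query : String) (out : List (String × String)) : Decidable (Spec_extract_modifiers query out) := by unfold Spec_extract_modifiers; infer_instance

-- ===== CLAIM (what is proved, stated in full; the proofs are below) =====
def Claim_equal_extract_modifiers : Prop := ∀ (query : String), Dom_extract_modifiers query → Spec_extract_modifiers query (extract_modifiers query)

-- ===== LEMMAS AND PROOFS =====

-- one iteration of the inner keyword loop, membership-wise
lemma mem_step (suffix : List Char) (f : PySem.Set String) (p : String × String) (s : String) :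
    (s ∈ if !PySem.Set.contains f p.2 && PySem.Chars.startswith suffix p.1.toList
         then PySem.Set.add f p.2 else f) ↔
    s ∈ f ∨ (p.2 = s ∧ p.1.toList <+: suffix) := by
  cases hc : PySem.Set.contains f p.2 <;> cases hs : PySem.Chars.startswith suffix p.1.toList <;>
    simp only [Bool.not_true, Bool.not_false, Bool.and_false,
      Bool.and_true, if_true, if_false, Bool.false_eq_true, PySem.Set.mem_add]
  · have hp : ¬ p.1.toList <+: suffix := by
      simpa [hs] using (PySem.Chars.startswith_iff suffix p.1.toList).symm.not
    tauto
  · have hp : p.1.toList <+: suffix := (PySem.Chars.startswith_iff suffix p.1.toList).mp hs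
    constructor
    · rintro (h | h)
      · exact Or.inl h
      · exact Or.inr ⟨h.symm, hp⟩
    · rintro (h | ⟨he, -⟩)
      · exact Or.inl h
      · exact Or.inr he.symm
  · have hm : p.2 ∈ f := (PySem.Set.contains_iff f p.2).mp hc
    constructor
    · exact Or.inl
    · rintro (h | ⟨he, -⟩)
      · exact h
      · exact he ▸ hm
  · have hm : p.2 ∈ f := (PySem.Set.contains_iff f p.2).mp hc
    constructor
    · exact Or.inl
    · rintro (h | ⟨he, -⟩)
      · exact h
      · exact he ▸ hm

-- the whole inner loop over an arbitrary rules list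
lemma mem_foldl_match (rules : List (String × String)) (suffix : List Char)
    (f : PySem.Set String) (s : String) :
    s ∈ rules.foldl (fun f p =>
        if !PySem.Set.contains f p.2 && PySem.Chars.startswith suffix p.1.toList
        then PySem.Set.add f p.2 else f) f ↔
    s ∈ f ∨ ∃ p ∈ rules, p.2 = s ∧ p.1.toList <+: suffix := by
  induction rules generalizing f with
  | nil => simp
  | cons p rest ih =>
    rw [List.foldl_cons, ih]
    rw [mem_step]
    simp only [List.mem_cons]
    constructor
    · rintro ((h | h) | ⟨q, hq, hrest⟩)
      · exact Or.inl h
      · exact Or.inr ⟨p, Or.inl rfl, h⟩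
      · exact Or.inr ⟨q, Or.inr hq, hrest⟩
    · rintro (h | ⟨q, (rfl | hq), hrest⟩)
      · exact Or.inl (Or.inl h)
      · exact Or.inl (Or.inr hrest)
      · exact Or.inr ⟨q, hq, hrest⟩

lemma mem_pvMatchAt (suffix : List Char) (found : PySem.Set String) (s : String) :
    s ∈ pvMatchAt suffix found ↔
      s ∈ found ∨ ∃ p ∈ pvKeywordFlags, p.2 = s ∧ p.1.toList <+: suffix :=
  mem_foldl_match pvKeywordFlags suffix found s

lemma exists_prefix_drop_cons (w : List Char) (c : Char) (rest : List Char) :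
    (∃ j, w <+: (c :: rest).drop j) ↔ w <+: (c :: rest) ∨ ∃ j, w <+: rest.drop j := by
  constructor
  · rintro ⟨j, h⟩
    cases j with
    | zero => exact Or.inl h
    | succ j => exact Or.inr ⟨j, h⟩
  · rintro (h | ⟨j, h⟩)
    · exact ⟨0, h⟩
    · exact ⟨j + 1, h⟩

-- after the whole scan, a flag is found iff one of its keywords occurs at some position
lemma mem_pvScan (cs : List Char) (found : PySem.Set String) (s : String) :
    s ∈ pvScan cs found ↔
      s ∈ found ∨ ∃ p ∈ pvKeywordFlags, p.2 = s ∧ ∃ j, p.1.toList <+: cs.drop j := by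
  induction cs generalizing found with
  | nil =>
    simp only [pvScan, List.drop_nil]
    constructor
    · exact Or.inl
    · rintro (h | ⟨p, hp, -, j, hw⟩)
      · exact h
      · have hnil : p.1.toList = [] := List.prefix_nil.mp hw
        fin_cases hp <;> simp_all
  | cons c rest ih =>
    rw [pvScan, ih, mem_pvMatchAt]
    simp only [exists_prefix_drop_cons]
    constructor
    · rintro ((h | ⟨p, hp, he, hpre⟩) | ⟨p, hp, he, j, hpre⟩)
      · exact Or.inl h
      · exact Or.inr ⟨p, hp, he, Or.inl hpre⟩
      · exact Or.inr ⟨p, hp, he, Or.inr ⟨j, hpre⟩⟩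
    · rintro (h | ⟨p, hp, he, (hpre | ⟨j, hpre⟩)⟩)
      · exact Or.inl (Or.inl h)
      · exact Or.inl (Or.inr ⟨p, hp, he, hpre⟩)
      · exact Or.inr ⟨p, hp, he, j, hpre⟩

-- occurrence at some position = Python's substring test
lemma exists_drop_iff_isIn (w q : String) :
    (∃ j, w.toList <+: q.toList.drop j) ↔ PySem.Str.isIn w q = true := by
  rw [PySem.Chars.exists_prefix_drop_iff_isIn, PySem.Chars.isIn_iff_infix,
    ← PySem.Str.isIn_iff_infix]

lemma contains_scan (q : String) (s : String) :
    PySem.Set.contains (pvScan q.toList PySem.Set.empty) s = true ↔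
      ∃ p ∈ pvKeywordFlags, p.2 = s ∧ PySem.Str.isIn p.1 q = true := by
  rw [PySem.Set.contains_iff, mem_pvScan]
  simp only [exists_drop_iff_isIn, PySem.Set.empty, List.not_mem_nil, false_or]

lemma scan_priority (q : String) :
    PySem.Set.contains (pvScan q.toList PySem.Set.empty) "priority" =
    (["critical", "urgent", "important", "priority"].any fun w => PySem.Str.isIn w q) := by
  rw [Bool.eq_iff_iff, contains_scan]
  simp [pvKeywordFlags]

lemma scan_recency (q : String) :
    PySem.Set.contains (pvScan q.toList PySem.Set.empty) "recency" =
    (["recent", "latest", "new", "current"].any fun w => PySem.Str.isIn w q) := by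
  rw [Bool.eq_iff_iff, contains_scan]
  simp [pvKeywordFlags]

lemma scan_severity (q : String) :
    PySem.Set.contains (pvScan q.toList PySem.Set.empty) "severity" =
    (["blocker", "blocking", "severe", "major"].any fun w => PySem.Str.isIn w q) := by
  rw [Bool.eq_iff_iff, contains_scan]
  simp [pvKeywordFlags]

lemma scan_broad (q : String) :
    PySem.Set.contains (pvScan q.toList PySem.Set.empty) "broad" =
    (["all", "everything", "comprehensive", "complete"].any fun w => PySem.Str.isIn w q) := by
  rw [Bool.eq_iff_iff, contains_scan]
  simp [pvKeywordFlags]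

lemma scan_narrow (q : String) :
    PySem.Set.contains (pvScan q.toList PySem.Set.empty) "narrow" =
    (["specific", "particular", "just", "only"].any fun w => PySem.Str.isIn w q) := by
  rw [Bool.eq_iff_iff, contains_scan]
  simp [pvKeywordFlags]

-- ===== VERDICT (by name: the statement is the Claim_ definition above) =====
theorem extract_modifiers_spec : Claim_equal_extract_modifiers := by
  intro query _
  unfold Spec_extract_modifiers extract_modifiers extract_modifiers_alt
  simp only [scan_priority, scan_recency, scan_severity, scan_broad, scan_narrow]
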